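-- pv_equiv track=rewrite | github.com/MightyCode/Enseirb-graphe-ramassage | christophides.py | compute_odd_degree_graph
-- ===== SOURCE A (Python) =====
-- def compute_odd_degree_graph(graph: list) -> list:
--     result : list = []
--
--     odd: list = []
--
--     for i in range(len(graph)):
--         if len(graph[i]) % 2 == 1:
--             odd.append(i)
--
--     for i in range(len(graph)):
--         result.append([])
--
--         if i in odd:
--             for j in odd:
--                 if i != j:
--                     result[i].append(j)
--
--     return result
-- ===== SOURCE B (Python) =====
-- def compute_odd_degree_graph(graph: list) -> list:
--     odd = [i for i, row in enumerate(graph) if len(row) % 2 == 1]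
--     result = [[] for _ in range(len(graph))]
--     for k in range(len(odd)):
--         a = odd[k]
--         for b in odd[k + 1:]:
--             result[a].append(b)
--             result[b].append(a)
--     return result
-- ===== Notes on version B (the rewrite author's own statement) =====
-- stated objective: alternative
-- what changed: B builds the clique edge-centrically: instead of A's per-vertex scan of the whole odd set (with a membership test per vertex of the graph), B iterates once over the unordered pairs of odd vertices and appends each edge to both endpoint rows of a preallocated result.
import Mathlib
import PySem

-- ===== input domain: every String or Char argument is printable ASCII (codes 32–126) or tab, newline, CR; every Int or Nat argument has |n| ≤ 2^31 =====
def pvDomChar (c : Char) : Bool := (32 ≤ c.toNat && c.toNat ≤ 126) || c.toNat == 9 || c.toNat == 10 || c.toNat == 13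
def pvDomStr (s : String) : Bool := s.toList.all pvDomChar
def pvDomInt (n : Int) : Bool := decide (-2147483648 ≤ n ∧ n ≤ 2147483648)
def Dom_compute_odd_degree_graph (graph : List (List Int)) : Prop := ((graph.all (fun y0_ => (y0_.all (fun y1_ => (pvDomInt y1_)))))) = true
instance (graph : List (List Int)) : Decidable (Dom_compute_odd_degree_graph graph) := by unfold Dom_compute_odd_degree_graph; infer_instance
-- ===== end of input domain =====

-- B builds the same clique edge-centrically (one pass over the unordered pairs of odd
-- vertices, appending each edge to both endpoint rows) instead of A's per-vertex scan.

-- ===== PORT A =====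
-- 'for i in range(len(graph)): … graph[i] …' ported over enumerate(graph) (same indices, same rows)
def compute_odd_degree_graph (graph : List (List Int)) : List (List Int) :=
  let odd : List Int :=
    (PySem.List.enumerate graph).foldl
      (fun odd p => if p.2.length % 2 == 1 then odd ++ [p.1] else odd) []
  (PySem.List.enumerate graph).foldl
    (fun result p =>
      result ++
        [if odd.contains p.1 then
            odd.foldl (fun row j => if p.1 ≠ j then row ++ [j] else row) []
          else []])
    []

-- ===== PORT B =====
-- result[i].append(v) (i a valid non-negative index)
def pvAppendAt (result : List (List Int)) (i : Int) (v : Int) : List (List Int) :=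
  result.modify i.toNat (fun row => row ++ [v])

-- 'for k in range(len(odd)): a = odd[k]; for b in odd[k+1:]: …' — the structural
-- recursion on odd visits exactly the suffix pairs (a, b)
def pvCliqueEdges (l : List Int) (result : List (List Int)) : List (List Int) :=
  match l with
  | [] => result
  | a :: rest =>
      pvCliqueEdges rest
        (rest.foldl (fun res b => pvAppendAt (pvAppendAt res a b) b a) result)

def compute_odd_degree_graph_alt (graph : List (List Int)) : List (List Int) :=
  let odd : List Int :=
    ((PySem.List.enumerate graph).filter (fun p => p.2.length % 2 == 1)).map (·.1)
  pvCliqueEdges odd (graph.map (fun _ => []))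

-- ===== PRECONDITION & SPEC =====
def Spec_compute_odd_degree_graph (graph : List (List Int)) (out : List (List Int)) : Prop := out = compute_odd_degree_graph_alt graph
instance (graph : List (List Int)) (out : List (List Int)) : Decidable (Spec_compute_odd_degree_graph graph out) := by unfold Spec_compute_odd_degree_graph; infer_instance

-- ===== CLAIM (what is proved, stated in full; the proofs are below) =====
def Claim_equal_compute_odd_degree_graph : Prop := ∀ (graph : List (List Int)), Dom_compute_odd_degree_graph graph → Spec_compute_odd_degree_graph graph (compute_odd_degree_graph graph)

-- ===== LEMMAS AND PROOFS =====

-- contribution of the edge loop to row x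
def pvContrib (l : List Int) (x : Nat) : List Int :=
  match l with
  | [] => []
  | a :: rest =>
      if (x : Int) = a then rest
      else (if (x : Int) ∈ rest then [a] else []) ++ pvContrib rest x

lemma pvContrib_of_not_mem (l : List Int) (x : Nat) (hx : (x : Int) ∉ l) :
    pvContrib l x = [] := by
  induction l with
  | nil => simp [pvContrib]
  | cons c cs ihc =>
      have h1 : ¬ (x : Int) = c := fun h => hx (by simp [h])
      have h2 : (x : Int) ∉ cs := fun h => hx (List.mem_cons_of_mem _ h)
      simp [pvContrib, h1, h2, ihc h2]

lemma pvAppendAt_getElem? (res : List (List Int)) (i : Int) (v : Int) (x : Nat) :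
    (pvAppendAt res i v)[x]? =
      if i.toNat = x then res[x]?.map (· ++ [v]) else res[x]? := by
  simp [pvAppendAt, List.getElem?_modify]
  split <;> cases h : res[x]? <;> simp

lemma inner_getElem? (a : Int) (rest : List Int) (res : List (List Int)) (x : Nat)
    (ha : 0 ≤ a) (hnn : ∀ b ∈ rest, 0 ≤ b) (hna : a ∉ rest) (hnd : rest.Nodup) :
    (rest.foldl (fun res b => pvAppendAt (pvAppendAt res a b) b a) res)[x]? =
      res[x]?.map
        (· ++ (if a.toNat = x then rest else if (x : Int) ∈ rest then [a] else [])) := by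
  induction rest generalizing res with
  | nil =>
      cases h : res[x]? <;> simp [h]
  | cons b bs ih =>
      have hb : 0 ≤ b := hnn b (by simp)
      have hnaa : a ∉ bs := fun h => hna (List.mem_cons_of_mem _ h)
      have hab : a ≠ b := fun h => hna (by simp [h])
      rw [List.foldl_cons,
        ih (pvAppendAt (pvAppendAt res a b) b a)
          (fun c hc => hnn c (List.mem_cons_of_mem _ hc)) hnaa hnd.of_cons,
        pvAppendAt_getElem?, pvAppendAt_getElem?]
      by_cases hax : a.toNat = x
      · have hbx : ¬ b.toNat = x := by
          intro h; exact hab (by omega)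
        simp only [hbx, if_false, hax, if_true]
        cases h : res[x]? <;> simp
      · by_cases hbx : b.toNat = x
        · have hxb : (x : Int) = b := by omega
          have hxnbs : (x : Int) ∉ bs := by
            rw [hxb]; exact (List.nodup_cons.mp hnd).1
          simp only [hbx, if_true, hax, if_false, hxnbs, if_false]
          cases h : res[x]? <;> simp [hxb]
        · have hxb : ¬ (x : Int) = b := by
            intro h
            exact hbx (by omega)
          simp only [hbx, if_false, hax, if_false, List.mem_cons, hxb, false_or]

lemma pvCliqueEdges_getElem? (l : List Int) (res : List (List Int)) (x : Nat)
    (hnn : ∀ b ∈ l, 0 ≤ b) (hnd : l.Nodup) :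
    (pvCliqueEdges l res)[x]? = res[x]?.map (· ++ pvContrib l x) := by
  induction l generalizing res with
  | nil =>
      cases h : res[x]? <;> simp [pvCliqueEdges, pvContrib, h]
  | cons a rest ih =>
      have ha : 0 ≤ a := hnn a (by simp)
      have hrest : ∀ b ∈ rest, 0 ≤ b := fun b hb => hnn b (List.mem_cons_of_mem _ hb)
      have hna : a ∉ rest := (List.nodup_cons.mp hnd).1
      rw [pvCliqueEdges, ih _ hrest hnd.of_cons,
        inner_getElem? a rest res x ha hrest hna hnd.of_cons]
      by_cases hax : a.toNat = x
      · have hxa : (x : Int) = a := by omega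
        have hrest0 : pvContrib rest x = [] :=
          pvContrib_of_not_mem rest x (by rw [hxa]; exact hna)
        simp only [hax, if_true, pvContrib, hxa, if_true, hrest0]
        cases h : res[x]? <;> simp
      · have hxa : ¬ (x : Int) = a := by
          intro h; exact hax (by omega)
        simp only [hax, if_false, pvContrib, hxa, if_false]
        cases h : res[x]? <;> simp

lemma pvContrib_eq_filter (l : List Int) (x : Nat) (hnd : l.Nodup) :
    pvContrib l x =
      if (x : Int) ∈ l then l.filter (fun j => (x : Int) ≠ j) else [] := by
  induction l with
  | nil => simp [pvContrib]
  | cons a rest ih =>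
      by_cases hxa : (x : Int) = a
      · have hxr : (x : Int) ∉ rest := by rw [hxa]; exact (List.nodup_cons.mp hnd).1
        have hself : rest.filter (fun j => (x : Int) ≠ j) = rest := by
          apply List.filter_eq_self.mpr
          intro b hb
          simp only [ne_eq, decide_not, Bool.not_eq_eq_eq_not, Bool.not_true,
            decide_eq_false_iff_not]
          intro h; exact hxr (h ▸ hb)
        rw [pvContrib, if_pos hxa, if_pos (by simp [hxa]), List.filter_cons_of_neg
          (by simp [hxa]), hself]
      · by_cases hxr : (x : Int) ∈ rest
        · simp [pvContrib, hxa, hxr, ih hnd.of_cons]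
        · simp [pvContrib, hxa, hxr, ih hnd.of_cons]

-- the odd list both ports build: distinct, non-negative indices
lemma odd_nonneg (graph : List (List Int)) :
    ∀ b ∈ ((PySem.List.enumerate graph).filter (fun p => p.2.length % 2 == 1)).map (·.1),
      0 ≤ b := by
  intro b hb
  simp only [List.mem_map, List.mem_filter] at hb
  obtain ⟨p, ⟨hp, _⟩, rfl⟩ := hb
  obtain ⟨k, hk, rfl⟩ := (PySem.List.mem_enumerate_iff _ _ _).mp hp
  simp

lemma odd_nodup (graph : List (List Int)) :
    (((PySem.List.enumerate graph).filter (fun p => p.2.length % 2 == 1)).map (·.1)).Nodup := by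
  have h := PySem.List.pairwise_lt_enumerate (xs := graph) (s := 0)
  exact List.pairwise_map.mpr ((h.filter _).imp (fun hlt heq => absurd heq (ne_of_lt hlt)))

theorem compute_odd_degree_graph_eq (graph : List (List Int)) :
    compute_odd_degree_graph graph = compute_odd_degree_graph_alt graph := by
  unfold compute_odd_degree_graph compute_odd_degree_graph_alt
  set odd : List Int :=
    ((PySem.List.enumerate graph).filter (fun p => p.2.length % 2 == 1)).map (·.1) with hodd
  have hfold : (PySem.List.enumerate graph).foldl
      (fun o p => if p.2.length % 2 == 1 then o ++ [p.1] else o) ([] : List Int) = odd := by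
    rw [PySem.List.foldl_append_if]; rfl
  rw [hfold]
  apply List.ext_getElem?
  intro x
  rw [PySem.List.foldl_append_singleton_eq_map, List.nil_append,
    pvCliqueEdges_getElem? odd _ x (odd_nonneg graph) (odd_nodup graph),
    List.getElem?_map, PySem.List.getElem?_enumerate, List.getElem?_map]
  cases hg : graph[x]? with
  | none => simp
  | some row =>
      simp only [Option.map_some]
      congr 1
      rw [pvContrib_eq_filter odd x (odd_nodup graph)]
      by_cases hx : (x : Int) ∈ odd
      · have hc : odd.contains ((x : Int)) = true := List.contains_iff_mem.mpr hx
        simp only [zero_add, hc, if_true, hx, if_true,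
          PySem.List.foldl_append_ite_eq_filter, List.nil_append]
      · simp [hx]

-- ===== VERDICT (by name: the statement is the Claim_ definition above) =====
theorem compute_odd_degree_graph_spec : Claim_equal_compute_odd_degree_graph := by
  intro graph _
  exact compute_odd_degree_graph_eq graph
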